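-- pv_equiv track=rewrite | github.com/nicework-jin/AlgorithmStudy_211124 | 211221/메뉴리뉴얼_정호제.py | solution
-- ===== SOURCE A (Python) =====
-- from itertools import combinations
-- from collections import defaultdict
--
-- def solution(orders, course):
--     answer = []
--     menu_dic = defaultdict(int)
--     course_dic = defaultdict(list)
--
--     for i in course:
--         for order in orders:
--             order = sorted(order)
--             for menu in combinations(order, i):
--                 menu_dic[''.join(menu)] += 1
--
--     for menu, cnt in menu_dic.items():
--         if cnt == 1:
--             continue
--         course_dic[len(menu)].append([menu, cnt])
--
--     for i in course:
--         course_dic[i].sort(key = lambda x: -x[1])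
--
--         if not course_dic[i]:
--             continue
--
--         answer.append(course_dic[i][0][0])
--         max_num = course_dic[i][0][1]
--
--         for course_menu in course_dic[i][1:]:
--             if course_menu[1] == max_num:
--                 answer.append(course_menu[0])
--             else:
--                 break
--
--     return sorted(answer)
-- ===== SOURCE B (Python) =====
-- from itertools import combinations
-- from collections import Counter
--
-- def solution(orders, course):
--     counts = Counter(''.join(menu)
--                      for i in course
--                      for order in orders
--                      for menu in combinations(sorted(order), i))
--     answer = []
--     for i in course:
--         cand = [(k, v) for k, v in counts.items() if len(k) == i and v >= 2]
--         if cand: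
--             mx = max(v for _, v in cand)
--             answer += [k for k, v in cand if v == mx]
--     return sorted(answer)
-- ===== Notes on version B (the rewrite author's own statement) =====
-- stated objective: simpler
-- what changed: B keeps one Counter over the same combination stream but replaces A's group-by-length dict, in-place descending sort and break-scan tie collection by a direct per-size filter of the counter items with a max-count selection.
import Mathlib
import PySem

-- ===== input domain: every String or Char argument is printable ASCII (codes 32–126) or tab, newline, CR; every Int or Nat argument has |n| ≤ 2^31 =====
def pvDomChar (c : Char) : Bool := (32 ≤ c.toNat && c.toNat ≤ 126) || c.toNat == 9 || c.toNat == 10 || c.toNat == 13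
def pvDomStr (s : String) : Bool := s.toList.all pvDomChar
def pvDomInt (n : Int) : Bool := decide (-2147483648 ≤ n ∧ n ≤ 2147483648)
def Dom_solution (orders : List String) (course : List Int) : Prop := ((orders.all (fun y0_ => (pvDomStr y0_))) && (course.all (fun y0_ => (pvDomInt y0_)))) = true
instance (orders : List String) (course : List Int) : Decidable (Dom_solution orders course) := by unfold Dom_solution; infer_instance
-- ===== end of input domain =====

-- B replaces A's group-by-length dict + in-place descending sort + break-scan selection by a single
-- Counter and, per course size, a direct filter of the counter items with a max-count selection.

-- itertools.combinations(xs, r): r-combinations of positions, lexicographic by index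
-- (both Pythons call this library function; shared faithful helper).
def pyCombinations : Nat → List Char → List (List Char)
  | 0, _ => [[]]
  | _ + 1, [] => []
  | r + 1, a :: t => (pyCombinations r t).map (fun m => a :: m) ++ pyCombinations (r + 1) t

-- ===== PORT A =====
-- ''.join over a tuple of single chars is String.ofList of those chars (PySem.Chars.join_nil_singletons).
-- i.toNat: for i < 0 Python raises ValueError (excluded by Pre_solution when orders ≠ []).
def solution (orders : List String) (course : List Int) : List String :=
  let menu_dic : PySem.Dict String Int :=
    course.foldl (fun d i =>
      orders.foldl (fun d order =>
        ((pyCombinations i.toNat (PySem.List.sorted order.toList (fun c => c) false)).foldl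
          (fun d menu => d.modify (String.ofList menu) 0 (· + 1)) d)) d) PySem.Dict.empty
  let course_dic : PySem.Dict Int (List (String × Int)) :=
    menu_dic.items.foldl (fun cd p =>
      if p.2 = 1 then cd
      else cd.modify ((PySem.Str.len p.1 : Int)) [] (fun l => l ++ [p])) PySem.Dict.empty
  let st := course.foldl (fun (st : List String × PySem.Dict Int (List (String × Int))) i =>
      let b := PySem.List.sorted (st.2.getD i []) (fun x => -x.2) false
      let cd := st.2.insert i b
      match b with
      | [] => (st.1, cd)
      | h :: t => (st.1 ++ h.1 :: (t.takeWhile (fun x => x.2 == h.2)).map (fun x => x.1), cd))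
    ([], course_dic)
  PySem.List.sorted st.1 (fun x => x) false

-- ===== PORT B =====
-- max(v for _, v in cand) is guarded by the nonemptiness test; .getD 0 is never used.
def solution_alt (orders : List String) (course : List Int) : List String :=
  let counts : PySem.Dict String Int :=
    PySem.Dict.counter (course.flatMap (fun i =>
      orders.flatMap (fun order =>
        (pyCombinations i.toNat (PySem.List.sorted order.toList (fun c => c) false)).map
          (fun menu => String.ofList menu))))
  let answer := course.foldl (fun acc i =>
      let cand := counts.items.filter (fun p => ((PySem.Str.len p.1 : Int) == i) && decide (2 ≤ p.2))
      if cand.isEmpty then acc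
      else
        let mx := (PySem.List.max? (cand.map (fun p => p.2)) (fun v => v)).getD 0
        acc ++ (cand.filter (fun p => p.2 == mx)).map (fun p => p.1)) []
  PySem.List.sorted answer (fun x => x) false

-- ===== PRECONDITION & SPEC =====
-- Pre_ excludes exactly the inputs where A raises: combinations(order, i) raises ValueError for a
-- negative i, reached iff orders is nonempty (B raises there too).
def Pre_solution (orders : List String) (course : List Int) : Prop :=
  orders = [] ∨ ∀ i ∈ course, 0 ≤ i
instance (orders : List String) (course : List Int) : Decidable (Pre_solution orders course) := by
  unfold Pre_solution; infer_instance

def pvWitness_solution : List String × List Int := (["abc", "b"], [2])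

def Spec_solution (orders : List String) (course : List Int) (out : List String) : Prop := out = solution_alt orders course
instance (orders : List String) (course : List Int) (out : List String) : Decidable (Spec_solution orders course out) := by unfold Spec_solution; infer_instance

-- ===== CLAIM (what is proved, stated in full; the proofs are below) =====
def Claim_equal_solution : Prop := ∀ (orders : List String) (course : List Int), Dom_solution orders course → Pre_solution orders course → Spec_solution orders course (solution orders course)

-- ===== LEMMAS AND PROOFS =====

-- the flattened stream of joined menus (both counting loops count exactly this stream)
def pvStream (orders : List String) (course : List Int) : List String :=
  course.flatMap (fun i =>
    orders.flatMap (fun order =>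
      (pyCombinations i.toNat (PySem.List.sorted order.toList (fun c => c) false)).map
        (fun menu => String.ofList menu)))

def pvItems (orders : List String) (course : List Int) : List (String × Int) :=
  (PySem.Dict.counter (pvStream orders course)).items

-- A's course_dic bucket for length i, in items order
def pvBucket (orders : List String) (course : List Int) (i : Int) : List (String × Int) :=
  ((pvItems orders course).filter (fun p => !decide (p.2 = 1))).filter
    (fun p => ((PySem.Str.len p.1 : Int) == i))

-- B's candidate list for length i
def pvCand (orders : List String) (course : List Int) (i : Int) : List (String × Int) :=
  (pvItems orders course).filter (fun p => ((PySem.Str.len p.1 : Int) == i) && decide (2 ≤ p.2))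

-- what A appends for one occurrence of i in course
def pvContribA (orders : List String) (course : List Int) (i : Int) : List String :=
  match PySem.List.sorted (pvBucket orders course i) (fun x => -x.2) false with
  | [] => []
  | h :: t => h.1 :: (t.takeWhile (fun x => x.2 == h.2)).map (fun x => x.1)

-- what B appends for one occurrence of i in course
def pvContribB (orders : List String) (course : List Int) (i : Int) : List String :=
  if (pvCand orders course i).isEmpty then []
  else
    ((pvCand orders course i).filter (fun p =>
      p.2 == (PySem.List.max? ((pvCand orders course i).map (fun p => p.2)) (fun v => v)).getD 0)).map
      (fun p => p.1)

lemma pv_foldl_ite_skip {α β : Type} (P : α → Prop) [DecidablePred P] (f : β → α → β)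
    (l : List α) (b : β) :
    l.foldl (fun acc x => if P x then acc else f acc x) b
      = (l.filter (fun x => !decide (P x))).foldl f b := by
  induction l generalizing b with
  | nil => rfl
  | cons x t ih =>
    by_cases h : P x <;> simp [h, ih]

lemma pv_foldl_abs {α β : Type} (f : List β → α → List β) (g : α → List β)
    (hf : ∀ acc x, f acc x = acc ++ g x) (l : List α) (acc : List β) :
    l.foldl f acc = acc ++ l.flatMap g := by
  induction l generalizing acc with
  | nil => simp
  | cons x t ih => simp [hf, ih, List.flatMap_cons]

lemma pv_flatMap_perm {α β : Type} (l : List α) (f g : α → List β)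
    (h : ∀ x, (f x).Perm (g x)) : (l.flatMap f).Perm (l.flatMap g) := by
  induction l with
  | nil => simp
  | cons x t ih => exact (h x).append ih

lemma pv_items_pos (orders : List String) (course : List Int) :
    ∀ p ∈ pvItems orders course, 1 ≤ p.2 := by
  intro p hp
  unfold pvItems at hp
  rw [PySem.Dict.items_counter] at hp
  rcases List.mem_map.1 hp with ⟨k, hk, rfl⟩
  have : k ∈ pvStream orders course := (PySem.Set.mem_ofList _ _).1 hk
  dsimp only
  exact_mod_cast List.count_pos_iff.2 this

lemma pv_cand_eq_bucket (orders : List String) (course : List Int) (i : Int) :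
    pvCand orders course i = pvBucket orders course i := by
  unfold pvCand pvBucket
  rw [List.filter_filter]
  apply List.filter_congr
  intro p hp
  have h1 := pv_items_pos orders course p hp
  have h2 : (2 ≤ p.2) ↔ ¬ (p.2 = 1) := by omega
  simp [h2, Bool.and_comm]

lemma pv_takeWhile_eq_filter {α : Type} (v : α → Int) (m : Int) (t : List α)
    (hb : ∀ x ∈ t, v x ≤ m) (hp : t.Pairwise (fun a b => v b ≤ v a)) :
    t.takeWhile (fun x => v x == m) = t.filter (fun x => v x == m) := by
  induction t with
  | nil => rfl
  | cons x t ih =>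
    rcases List.pairwise_cons.1 hp with ⟨hx, hp'⟩
    by_cases h : v x = m
    · simp only [List.takeWhile_cons, List.filter_cons, h, beq_self_eq_true, if_true]
      rw [ih (fun y hy => hb y (List.mem_cons_of_mem _ hy)) hp']
    · have hxm : v x ≤ m := hb x List.mem_cons_self
      have hnil : t.filter (fun y => v y == m) = [] := by
        rw [List.filter_eq_nil_iff]
        intro y hy
        have : v y ≤ v x := hx y hy
        simp only [beq_iff_eq]
        omega
      simp [h, hnil]

lemma pv_contrib_perm (orders : List String) (course : List Int) (i : Int) :
    (pvContribA orders course i).Perm (pvContribB orders course i) := by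
  unfold pvContribA
  cases hC : PySem.List.sorted (pvBucket orders course i) (fun x : String × Int => -x.2) false with
  | nil =>
    have hb : pvBucket orders course i = [] := (PySem.List.sorted_eq_nil_iff _ _ _).1 hC
    have hc : pvCand orders course i = [] := by rw [pv_cand_eq_bucket, hb]
    unfold pvContribB
    rw [hc]
    exact List.Perm.refl _
  | cons h tl =>
    have hperm : (h :: tl).Perm (pvBucket orders course i) := by
      rw [← hC]; exact PySem.List.sorted_perm _ _ _
    have hb : pvBucket orders course i ≠ [] := by
      intro e
      rw [e] at hC
      simp [PySem.List.sorted] at hC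
    have hcand : pvCand orders course i = pvBucket orders course i :=
      pv_cand_eq_bucket orders course i
    have hne : ¬ (pvCand orders course i).isEmpty := by
      rw [hcand, List.isEmpty_iff]; exact hb
    -- the max? value
    obtain ⟨m, hm⟩ : ∃ m, PySem.List.max? ((pvCand orders course i).map (fun p => p.2))
        (fun v => v) = some m := by
      cases e : PySem.List.max? ((pvCand orders course i).map (fun p => p.2)) (fun v => v) with
      | none =>
        rw [PySem.List.max?_eq_none_iff, List.map_eq_nil_iff, hcand] at e
        exact absurd e hb
      | some m => exact ⟨m, rfl⟩
    -- head bounds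
    have hub : ∀ y ∈ pvBucket orders course i, y.2 ≤ h.2 := by
      intro y hy
      have := PySem.List.key_head_sorted_le (pvBucket orders course i)
        (fun x : String × Int => -x.2) hC y hy
      dsimp only at this
      omega
    have hmh : m = h.2 := by
      have h1 : m ≤ h.2 := by
        have hmem := PySem.List.max?_mem hm
        rcases List.mem_map.1 hmem with ⟨p, hp, rfl⟩
        exact hub p (hcand ▸ hp)
      have h2 : h.2 ≤ m := by
        have hhb : h ∈ pvBucket orders course i := hperm.subset List.mem_cons_self
        exact PySem.List.max?_isMax hm h.2 (List.mem_map.2 ⟨h, hcand ▸ hhb, rfl⟩)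
      omega
    -- A's contribution as a filter of the sorted list
    have hpw : tl.Pairwise (fun a b : String × Int => b.2 ≤ a.2) := by
      have := PySem.List.sorted_pairwise (pvBucket orders course i) (fun x : String × Int => -x.2)
      rw [hC] at this
      exact (List.pairwise_cons.1 this).2.imp (by intro a b hab; omega)
    have htb : ∀ x ∈ tl, x.2 ≤ h.2 := fun x hx =>
      hub x (hperm.subset (List.mem_cons_of_mem _ hx))
    have hA : h.1 :: (tl.takeWhile (fun x => x.2 == h.2)).map (fun x => x.1)
        = ((h :: tl).filter (fun x => x.2 == h.2)).map (fun x => x.1) := by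
      rw [pv_takeWhile_eq_filter (fun x : String × Int => x.2) h.2 tl htb hpw]
      simp
    show (h.1 :: (tl.takeWhile (fun x => x.2 == h.2)).map (fun x => x.1)).Perm
      (pvContribB orders course i)
    rw [hA]
    unfold pvContribB
    rw [if_neg hne, hm]
    simp only [Option.getD_some, hmh, hcand]
    exact ((hperm.filter _).map _)

lemma pv_menu_dic (orders : List String) (course : List Int) :
    course.foldl (fun d i =>
      orders.foldl (fun d order =>
        ((pyCombinations i.toNat (PySem.List.sorted order.toList (fun c => c) false)).foldl
          (fun d menu => d.modify (String.ofList menu) 0 (· + 1)) d)) d) PySem.Dict.empty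
      = PySem.Dict.counter (pvStream orders course) := by
  rw [PySem.Dict.counter_eq_foldl]
  unfold pvStream
  simp [List.foldl_flatMap, List.foldl_map]

lemma pv_course_dic (orders : List String) (course : List Int) (i : Int) :
    ((pvItems orders course).foldl (fun cd p =>
      if p.2 = 1 then cd
      else cd.modify ((PySem.Str.len p.1 : Int)) [] (fun l => l ++ [p]))
      (PySem.Dict.empty : PySem.Dict Int (List (String × Int)))).getD i []
      = pvBucket orders course i := by
  rw [pv_foldl_ite_skip (fun p : String × Int => p.2 = 1)]
  have : ((pvItems orders course).filter (fun p => !decide (p.2 = 1))).foldl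
      (fun cd p => cd.modify ((PySem.Str.len p.1 : Int)) [] (fun l => l ++ [p]))
      (PySem.Dict.empty : PySem.Dict Int (List (String × Int)))
      = (((pvItems orders course).filter (fun p => !decide (p.2 = 1))).map
          (fun p => (((PySem.Str.len p.1 : Int)), p))).foldl
          (fun cd q => cd.modify q.1 [] (fun l => l ++ [q.2])) PySem.Dict.empty := by
    rw [List.foldl_map]
  rw [this, PySem.Dict.getD_foldl_modify_append]
  unfold pvBucket
  simp [List.filter_map, List.map_map, Function.comp_def]

lemma pv_selA (orders : List String) (course : List Int) (course' : List Int)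
    (acc : List String) (cd : PySem.Dict Int (List (String × Int)))
    (hinv : ∀ j, PySem.List.sorted (cd.getD j []) (fun x : String × Int => -x.2) false
        = PySem.List.sorted (pvBucket orders course j) (fun x => -x.2) false) :
    (course'.foldl (fun (st : List String × PySem.Dict Int (List (String × Int))) i =>
      let b := PySem.List.sorted (st.2.getD i []) (fun x => -x.2) false
      let cd := st.2.insert i b
      match b with
      | [] => (st.1, cd)
      | h :: t => (st.1 ++ h.1 :: (t.takeWhile (fun x => x.2 == h.2)).map (fun x => x.1), cd))
      (acc, cd)).1
      = acc ++ course'.flatMap (pvContribA orders course) := by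
  induction course' generalizing acc cd with
  | nil => simp
  | cons i t ih =>
    rw [List.foldl_cons]
    dsimp only
    rw [hinv i]
    have hinv' : ∀ j, PySem.List.sorted
        ((cd.insert i (PySem.List.sorted (pvBucket orders course i) (fun x => -x.2) false)).getD j [])
          (fun x : String × Int => -x.2) false
        = PySem.List.sorted (pvBucket orders course j) (fun x => -x.2) false := by
      intro j
      rw [PySem.Dict.getD_insert]
      by_cases hj : j = i
      · rw [if_pos hj, PySem.List.sorted_sorted, hj]
      · rw [if_neg hj]; exact hinv j
    cases hC : PySem.List.sorted (pvBucket orders course i) (fun x : String × Int => -x.2) false with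
    | nil =>
      rw [hC] at hinv'
      rw [ih acc _ hinv']
      have : pvContribA orders course i = [] := by unfold pvContribA; rw [hC]
      rw [List.flatMap_cons, this, List.nil_append]
    | cons h tl =>
      rw [hC] at hinv'
      rw [ih _ _ hinv']
      have : pvContribA orders course i
          = h.1 :: (tl.takeWhile (fun x => x.2 == h.2)).map (fun x => x.1) := by
        unfold pvContribA; rw [hC]
      rw [List.flatMap_cons, this, List.append_assoc, List.cons_append]

lemma pv_course_dic_counter (orders : List String) (course : List Int) (i : Int) :
    ((PySem.Dict.counter (pvStream orders course)).items.foldl (fun cd p =>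
      if p.2 = 1 then cd
      else cd.modify ((PySem.Str.len p.1 : Int)) [] (fun l => l ++ [p]))
      (PySem.Dict.empty : PySem.Dict Int (List (String × Int)))).getD i []
      = pvBucket orders course i := pv_course_dic orders course i

lemma pv_solution_eq (orders : List String) (course : List Int) :
    solution orders course
      = PySem.List.sorted (course.flatMap (pvContribA orders course)) (fun x => x) false := by
  unfold solution
  dsimp only
  rw [pv_menu_dic]
  congr 1
  rw [pv_selA orders course course [] _ (fun j => by rw [pv_course_dic_counter orders course j]),
    List.nil_append]

lemma pv_solution_alt_eq (orders : List String) (course : List Int) :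
    solution_alt orders course
      = PySem.List.sorted (course.flatMap (pvContribB orders course)) (fun x => x) false := by
  unfold solution_alt
  dsimp only
  congr 1
  apply pv_foldl_abs
  intro acc i
  have hc : (PySem.Dict.counter (course.flatMap (fun i =>
      orders.flatMap (fun order =>
        (pyCombinations i.toNat (PySem.List.sorted order.toList (fun c => c) false)).map
          (fun menu => String.ofList menu))))).items.filter
      (fun p => ((PySem.Str.len p.1 : Int) == i) && decide (2 ≤ p.2)) = pvCand orders course i := rfl
  rw [hc]
  unfold pvContribB
  by_cases h : (pvCand orders course i).isEmpty
  · rw [if_pos h, if_pos h, List.append_nil]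
  · rw [if_neg h, if_neg h]

-- ===== VERDICT (by name: the statement is the Claim_ definition above) =====
theorem solution_spec : Claim_equal_solution := by
  intro orders course _ _
  unfold Spec_solution
  rw [pv_solution_eq, pv_solution_alt_eq]
  exact PySem.List.sorted_eq_sorted_of_perm _ _ _ (fun a b h => h)
    (pv_flatMap_perm _ _ _ (pv_contrib_perm orders course))
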